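-- pv_equiv track=rewrite | github.com/AlexIvanov11/Algorithms | Lesson_1/find_place/find_place.py | map_zeros
-- ===== SOURCE A (Python) =====
-- from typing import Union, List
--
-- def map_zeros(sequence: Union[list, tuple]) -> List[int]:
--     res = []
--     current = 0
--     for i in range(len(sequence)):
--         if sequence[i] != 0 and sequence[i] != 1:
--             raise ValueError(f'Sequence should contain only 0 and 1! Got {sequence[i]} at position {i}')
--         if sequence[i] == 0:
--             current += 1
--         elif current != 0:
--             res.append(current)
--             current = 0
--         else:
--             current = 0
--     if current != 0:
--         res.append(current)
--
--     return res
-- ===== SOURCE B (Python) =====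
-- def map_zeros(sequence):
--     # validation pass: identical error at the first bad element, in order
--     for i in range(len(sequence)):
--         if sequence[i] != 0 and sequence[i] != 1:
--             raise ValueError(f'Sequence should contain only 0 and 1! Got {sequence[i]} at position {i}')
--     # delimiter-splitting representation: runs of zeros are the non-empty parts between '1's
--     s = ''.join('0' if x == 0 else '1' for x in sequence)
--     return [len(part) for part in s.split('1') if part]
-- ===== Notes on version B (the rewrite author's own statement) =====
-- stated objective: simpler
-- what changed: Separates validation from run extraction and replaces the manual accumulator/flush loop by building a '0'/'1' string and reading the zero-run lengths off the non-empty parts of s.split('1').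
import Mathlib
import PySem

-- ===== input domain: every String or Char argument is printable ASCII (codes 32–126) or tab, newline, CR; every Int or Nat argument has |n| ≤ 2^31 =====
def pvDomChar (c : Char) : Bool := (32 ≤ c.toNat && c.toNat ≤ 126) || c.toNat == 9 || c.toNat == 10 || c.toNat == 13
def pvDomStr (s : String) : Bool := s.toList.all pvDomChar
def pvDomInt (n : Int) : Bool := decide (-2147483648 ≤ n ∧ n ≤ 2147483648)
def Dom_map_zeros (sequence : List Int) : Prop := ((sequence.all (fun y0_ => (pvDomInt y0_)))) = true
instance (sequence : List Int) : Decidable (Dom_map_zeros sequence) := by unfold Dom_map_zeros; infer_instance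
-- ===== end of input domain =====

-- B separates validation from run extraction: it builds a '0'/'1' string and reads the
-- zero-run lengths off the non-empty parts of split('1'), instead of A's accumulator/flush loop.

-- ===== PORT A =====
-- A's loop 'for i in range(len(sequence))' reads sequence[i] for i = 0,…,len-1: the
-- elements in order, so it is ported as a fold over the list with state (res, current).
def map_zeros (sequence : List Int) : List Int :=
  let st := sequence.foldl (fun (p : List Int × Int) x =>
    if x ≠ 0 ∧ x ≠ 1 then p          -- Python raises ValueError here; excluded by Pre_
    else if x = 0 then (p.1, p.2 + 1)
    else if p.2 ≠ 0 then (p.1 ++ [p.2], 0)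
    else (p.1, 0)) ([], 0)
  if st.2 ≠ 0 then st.1 ++ [st.2] else st.1

-- ===== PORT B =====
-- Source B's validation pass only raises (those inputs are excluded by Pre_), so it computes
-- nothing here; ''.join over single chars is the map below, s.split('1') is List.splitOn.
def map_zeros_alt (sequence : List Int) : List Int :=
  let chars : List Char := sequence.map (fun x => if x = 0 then '0' else '1')
  ((chars.splitOn '1').filter (fun p => p ≠ [])).map (fun p => (p.length : Int))

-- ===== PRECONDITION & SPEC =====
-- Pre_ excludes exactly the inputs containing an element other than 0 or 1, on which A
-- raises ValueError.
def Pre_map_zeros (sequence : List Int) : Prop := ∀ x ∈ sequence, x = 0 ∨ x = 1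
instance (sequence : List Int) : Decidable (Pre_map_zeros sequence) := by
  unfold Pre_map_zeros; infer_instance
def pvWitness_map_zeros : List Int := [0, 0, 1, 0]

def Spec_map_zeros (sequence : List Int) (out : List Int) : Prop := out = map_zeros_alt sequence
instance (sequence : List Int) (out : List Int) : Decidable (Spec_map_zeros sequence out) := by unfold Spec_map_zeros; infer_instance

-- ===== CLAIM (what is proved, stated in full; the proofs are below) =====
def Claim_equal_map_zeros : Prop := ∀ (sequence : List Int), Dom_map_zeros sequence → Pre_map_zeros sequence → Spec_map_zeros sequence (map_zeros sequence)

-- ===== LEMMAS AND PROOFS =====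

-- A's loop body and final flush, named for the proofs
def stepA (p : List Int × Int) (x : Int) : List Int × Int :=
  if x ≠ 0 ∧ x ≠ 1 then p
  else if x = 0 then (p.1, p.2 + 1)
  else if p.2 ≠ 0 then (p.1 ++ [p.2], 0)
  else (p.1, 0)

def finishA (st : List Int × Int) : List Int :=
  if st.2 ≠ 0 then st.1 ++ [st.2] else st.1

lemma map_zeros_eq (sequence : List Int) :
    map_zeros sequence = finishA (sequence.foldl stepA ([], 0)) := rfl

-- the run-length reading of a char list, as B computes it
def runLens (cs : List Char) : List Int :=
  ((cs.splitOn '1').filter (fun p => p ≠ [])).map (fun p => (p.length : Int))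

lemma map_zeros_alt_eq (sequence : List Int) :
    map_zeros_alt sequence = runLens (sequence.map (fun x => if x = 0 then '0' else '1')) := rfl

lemma runLens_replicate (c : Nat) :
    runLens (List.replicate c '0') = if c = 0 then [] else [(c : Int)] := by
  have h : (List.replicate c '0').splitOn '1' = [List.replicate c '0'] := by
    simp only [List.splitOn]
    exact List.splitOnP_eq_single _ _ (by intro x hx; simp [List.eq_of_mem_replicate hx])
  unfold runLens
  rw [h]
  cases c with
  | zero => simp
  | succ n => simp [List.filter, List.replicate_succ]

lemma splitOn_replicate_append (c : Nat) (l : List Char) :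
    (List.replicate c '0' ++ '1' :: l).splitOn '1'
      = List.replicate c '0' :: l.splitOn '1' := by
  simp only [List.splitOn]
  rw [List.splitOnP_append_cons _ _ _ _ (by decide),
    List.splitOnP_eq_single _ _ (by intro x hx; simp [List.eq_of_mem_replicate hx])]
  simp

lemma runLens_replicate_one (c : Nat) (l : List Char) :
    runLens (List.replicate c '0' ++ '1' :: l)
      = (if c = 0 then [] else [(c : Int)]) ++ runLens l := by
  unfold runLens
  rw [splitOn_replicate_append]
  cases c with
  | zero => simp
  | succ n => simp [List.filter, List.replicate_succ]

-- the loop invariant of A's fold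
lemma foldA_invariant (seq : List Int) (h : ∀ x ∈ seq, x = 0 ∨ x = 1)
    (res : List Int) (c : Nat) :
    finishA (seq.foldl stepA (res, (c : Int)))
      = res ++ runLens (List.replicate c '0' ++ seq.map (fun x => if x = 0 then '0' else '1')) := by
  induction seq generalizing res c with
  | nil =>
      simp only [List.foldl_nil, List.map_nil, List.append_nil, runLens_replicate, finishA]
      cases c with
      | zero => simp
      | succ n =>
          have h1 : ((n + 1 : Nat) : Int) ≠ 0 := by positivity
          simp only [Nat.cast_add, Nat.cast_one] at h1
          simp [h1]
  | cons x t ih =>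
      have ht : ∀ y ∈ t, y = 0 ∨ y = 1 := fun y hy => h y (List.mem_cons_of_mem _ hy)
      rcases h x (List.mem_cons_self) with hx | hx
      · subst hx
        have hs : stepA (res, (c : Int)) 0 = (res, ((c + 1 : Nat) : Int)) := by
          simp [stepA]
        rw [List.foldl_cons, hs, ih ht]
        simp [List.replicate_succ']
      · subst hx
        rw [List.map_cons, if_neg (by norm_num), runLens_replicate_one]
        by_cases hc : c = 0
        · subst hc
          have hs : stepA (res, ((0 : Nat) : Int)) 1 = (res, ((0 : Nat) : Int)) := by
            simp [stepA]
          rw [List.foldl_cons, hs, ih ht]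
          simp
        · have hcI : ((c : Int) ≠ 0) := by exact_mod_cast hc
          have hs : stepA (res, (c : Int)) 1 = (res ++ [(c : Int)], ((0 : Nat) : Int)) := by
            simp [stepA, hc]
          rw [List.foldl_cons, hs, ih ht, if_neg hc]
          simp

-- ===== VERDICT (by name: the statement is the Claim_ definition above) =====
theorem map_zeros_spec : Claim_equal_map_zeros := by
  intro seq _ hpre
  unfold Spec_map_zeros
  rw [map_zeros_eq, map_zeros_alt_eq,
    show ((0 : Int)) = ((0 : Nat) : Int) from rfl, foldA_invariant seq hpre [] 0]
  simp
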